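-- pv_equiv track=rewrite | github.com/Lendersmark/countryflag | src/countryflag/cli/main.py | preprocess_args
-- ===== SOURCE A (Python) =====
-- from typing import List, Tuple
--
-- def preprocess_args(args: List[str]) -> Tuple[List[str], List[str]]:
--     """
--     Preprocess command line arguments to handle backwards compatibility.
--
--     When mutually exclusive flags are present along with positional arguments,
--     the positional arguments should be ignored (backwards compatibility).
--
--     Args:
--         args: List of command line arguments
--
--     Returns:
--         Tuple of (processed_args_for_parser, extracted_positional_args)
--     """
--     # Flags that are mutually exclusive with positional arguments
--     mutually_exclusive_flags = {
--         "--countries",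
--         "--file",
--         "--files",
--         "--reverse",
--         "--region",
--         "--interactive",
--     }
--
--     # Check if any mutually exclusive flag is present
--     has_mutually_exclusive_flag = any(flag in args for flag in mutually_exclusive_flags)
--
--     processed_args = []
--     extracted_positional = []
--     i = 0
--
--     while i < len(args):
--         arg = args[i]
--         if arg.startswith("-"):
--             processed_args.append(arg)
--             # Handle flags that take values
--             if arg in [
--                 "--file",
--                 "--region",
--                 "--threshold",
--                 "--language",
--                 "--validate",
--                 "--workers",
--                 "--cache-dir",
--                 "--separator",
--                 "--format",
--             ]:
--                 # Single value flags
--                 if i + 1 < len(args) and not args[i + 1].startswith("-"):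
--                     i += 1
--                     processed_args.append(args[i])
--             elif arg in ["--countries", "--files", "--reverse"]:
--                 # Multi-value flags - collect all non-flag arguments following this flag
--                 while i + 1 < len(args) and not args[i + 1].startswith("-"):
--                     i += 1
--                     processed_args.append(args[i])
--         else:
--             # This is a positional argument
--             if has_mutually_exclusive_flag:
--                 # Ignore positional args when mutually exclusive flags are
--                 # present (backwards compatibility)
--                 pass
--             else:
--                 # Keep positional args when no mutually exclusive flags are present
--                 extracted_positional.append(arg)
--         i += 1
--
--     return processed_args, extracted_positional
-- ===== SOURCE B (Python) =====
-- from typing import List, Tuple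
--
-- MUTEX = {"--countries", "--file", "--files", "--reverse", "--region", "--interactive"}
-- SINGLE = {"--file", "--region", "--threshold", "--language", "--validate",
--           "--workers", "--cache-dir", "--separator", "--format"}
-- MULTI = {"--countries", "--files", "--reverse"}
--
-- def preprocess_args(args: List[str]) -> Tuple[List[str], List[str]]:
--     """State-machine rewrite: one forward pass carrying what the previous flag expects."""
--     has_mutex = any(a in MUTEX for a in args)
--     processed: List[str] = []
--     positional: List[str] = []
--     expect = "none"  # what the last seen flag still expects: "none" | "one" | "many"
--     for a in args:
--         if a.startswith("-"):
--             processed.append(a)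
--             expect = "one" if a in SINGLE else ("many" if a in MULTI else "none")
--         elif expect == "one":
--             processed.append(a)
--             expect = "none"
--         elif expect == "many":
--             processed.append(a)
--         elif not has_mutex:
--             positional.append(a)
--     return processed, positional
-- ===== Notes on version B (the rewrite author's own statement) =====
-- stated objective: idiomatic
-- what changed: Replaced the index-based while loop with manual lookahead (i+1 peeking and a nested inner while for multi-value flags) by a single forward for-loop over the tokens that carries an 'expect' state (none/one/many) set by the last flag seen.
import Mathlib
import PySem

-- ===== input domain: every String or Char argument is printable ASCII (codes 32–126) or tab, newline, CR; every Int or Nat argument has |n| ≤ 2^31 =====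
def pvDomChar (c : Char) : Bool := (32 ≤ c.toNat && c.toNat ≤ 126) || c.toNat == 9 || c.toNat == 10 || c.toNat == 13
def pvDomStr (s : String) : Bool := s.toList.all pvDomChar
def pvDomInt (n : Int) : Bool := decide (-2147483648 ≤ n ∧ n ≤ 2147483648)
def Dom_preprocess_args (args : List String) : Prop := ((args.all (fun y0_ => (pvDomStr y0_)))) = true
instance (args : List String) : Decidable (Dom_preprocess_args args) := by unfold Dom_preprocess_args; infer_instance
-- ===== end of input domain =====

-- B replaces A's index/lookahead while-loop by a single forward pass carrying an 'expect' state (objective: idiomatic).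

-- ===== PORT A =====
-- the set literal of mutually exclusive flags
def pvMutexFlags : List String :=
  ["--countries", "--file", "--files", "--reverse", "--region", "--interactive"]

-- the list literal of single-value flags
def pvSingleFlags : List String :=
  ["--file", "--region", "--threshold", "--language", "--validate",
   "--workers", "--cache-dir", "--separator", "--format"]

-- the list literal of multi-value flags
def pvMultiFlags : List String := ["--countries", "--files", "--reverse"]

-- A's inner 'while i + 1 < len(args) and not args[i+1].startswith("-")':
-- the consumed run of non-flag tokens and the remaining suffix
def pvConsumeRun : List String → List String × List String
  | [] => ([], [])
  | b :: rest =>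
    if PySem.Str.startswith b "-" then ([], b :: rest)
    else ((b :: (pvConsumeRun rest).1), (pvConsumeRun rest).2)

-- needed for pvLoopA's termination
theorem pvConsumeRun_len (l : List String) : (pvConsumeRun l).2.length ≤ l.length := by
  induction l with
  | nil => simp [pvConsumeRun]
  | cons b rest ih =>
    simp only [pvConsumeRun]
    split
    · simp
    · simpa using Nat.le_succ_of_le ih

-- A's while loop, as structural recursion over the remaining suffix of args
def pvLoopA (hasMutex : Bool) : List String → List String × List String
  | [] => ([], [])
  | a :: rest =>
    if PySem.Str.startswith a "-" then
      if a ∈ pvSingleFlags then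
        match rest with
        | [] => (a :: (pvLoopA hasMutex []).1, (pvLoopA hasMutex []).2)
        | b :: rest' =>
          if PySem.Str.startswith b "-" then
            let (p, x) := pvLoopA hasMutex (b :: rest')
            (a :: p, x)
          else
            let (p, x) := pvLoopA hasMutex rest'
            (a :: b :: p, x)
      else if a ∈ pvMultiFlags then
        let cr := pvConsumeRun rest
        let (p, x) := pvLoopA hasMutex cr.2
        (a :: (cr.1 ++ p), x)
      else
        let (p, x) := pvLoopA hasMutex rest
        (a :: p, x)
    else
      let (p, x) := pvLoopA hasMutex rest
      if hasMutex then (p, x) else (p, a :: x)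
termination_by l => l.length
decreasing_by
  all_goals (try simp)
  all_goals (have h := pvConsumeRun_len rest; simp; omega)

def preprocess_args (args : List String) : List String × List String :=
  let hasMutex := pvMutexFlags.any (fun f => args.contains f)
  pvLoopA hasMutex args

-- ===== PORT B =====
-- B's for-loop: one forward pass with state 'expect' (0 = none, 1 = one, 2 = many)
def pvLoopB (hasMutex : Bool) (expect : Nat) : List String → List String × List String
  | [] => ([], [])
  | a :: rest =>
    if PySem.Str.startswith a "-" then
      let e := if a ∈ pvSingleFlags then 1 else if a ∈ pvMultiFlags then 2 else 0
      let (p, x) := pvLoopB hasMutex e rest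
      (a :: p, x)
    else if expect = 1 then
      let (p, x) := pvLoopB hasMutex 0 rest
      (a :: p, x)
    else if expect = 2 then
      let (p, x) := pvLoopB hasMutex 2 rest
      (a :: p, x)
    else
      let (p, x) := pvLoopB hasMutex 0 rest
      if hasMutex then (p, x) else (p, a :: x)

def preprocess_args_alt (args : List String) : List String × List String :=
  let hasMutex := pvMutexFlags.any (fun f => args.contains f)
  pvLoopB hasMutex 0 args

-- ===== PRECONDITION & SPEC =====
def Spec_preprocess_args (args : List String) (out : List String × List String) : Prop := out = preprocess_args_alt args
instance (args : List String) (out : List String × List String) : Decidable (Spec_preprocess_args args out) := by unfold Spec_preprocess_args; infer_instance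

-- ===== CLAIM (what is proved, stated in full; the proofs are below) =====
def Claim_equal_preprocess_args : Prop := ∀ (args : List String), Dom_preprocess_args args → Spec_preprocess_args args (preprocess_args args)

-- ===== LEMMAS AND PROOFS =====

-- when the list is empty or starts with a flag token, pvLoopB ignores the expect state
theorem pvLoopB_expect_irrel (h : Bool) (e e' : Nat) (l : List String)
    (hl : l = [] ∨ ∃ b rest, l = b :: rest ∧ PySem.Chars.startswith b.toList ['-'] = true) :
    pvLoopB h e l = pvLoopB h e' l := by
  rcases hl with rfl | ⟨b, rest, rfl, hb⟩
  · rfl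
  · simp [pvLoopB, hb]

-- pvLoopB in state 2 swallows a run of non-flag tokens into processed
theorem pvLoopB_two_run (h : Bool) (run rest : List String)
    (hrun : ∀ b ∈ run, PySem.Chars.startswith b.toList ['-'] = false) :
    pvLoopB h 2 (run ++ rest) =
      ((run ++ (pvLoopB h 2 rest).1), (pvLoopB h 2 rest).2) := by
  induction run with
  | nil => simp
  | cons b bs ih =>
    have hb : PySem.Chars.startswith b.toList ['-'] = false := hrun b (by simp)
    simp only [List.cons_append, pvLoopB]
    rw [ih (fun c hc => hrun c (by simp [hc]))]
    simp [hb]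

theorem pvConsumeRun_split (l : List String) :
    (pvConsumeRun l).1 ++ (pvConsumeRun l).2 = l := by
  induction l with
  | nil => simp [pvConsumeRun]
  | cons b rest ih =>
    simp only [pvConsumeRun]
    split
    · simp
    · simpa using ih

theorem pvConsumeRun_run (l : List String) :
    ∀ b ∈ (pvConsumeRun l).1, PySem.Chars.startswith b.toList ['-'] = false := by
  induction l with
  | nil => simp [pvConsumeRun]
  | cons b rest ih =>
    simp only [pvConsumeRun]
    split
    · simp
    · next hb =>
      intro c hc
      rw [show ((b :: (pvConsumeRun rest).1, (pvConsumeRun rest).2)).1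
            = b :: (pvConsumeRun rest).1 from rfl, List.mem_cons] at hc
      rcases hc with rfl | hc
      · simpa using hb
      · exact ih c hc

theorem pvConsumeRun_rest (l : List String) :
    (pvConsumeRun l).2 = [] ∨
      ∃ b rest, (pvConsumeRun l).2 = b :: rest ∧ PySem.Chars.startswith b.toList ['-'] = true := by
  induction l with
  | nil => simp [pvConsumeRun]
  | cons b rest ih =>
    simp only [pvConsumeRun]
    split
    · next hb => exact Or.inr ⟨b, rest, by simpa using hb⟩
    · simpa using ih

-- the main bridge: A's lookahead loop equals B's state machine started in state 0
theorem pvLoopA_eq_loopB (h : Bool) :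
    ∀ n l, List.length l ≤ n → pvLoopA h l = pvLoopB h 0 l := by
  intro n
  induction n with
  | zero =>
    intro l hl
    have hnil : l = [] := List.eq_nil_of_length_eq_zero (Nat.le_zero.mp hl)
    subst hnil
    simp [pvLoopA, pvLoopB]
  | succ n ih =>
    intro l hl
    match l with
    | [] => simp [pvLoopA, pvLoopB]
    | a :: rest =>
      simp only [List.length_cons, Nat.succ_le_succ_iff] at hl
      by_cases ha : PySem.Chars.startswith a.toList ['-'] = true
      · by_cases hs : a ∈ pvSingleFlags
        · -- single-value flag: B enters state 1
          match rest with
          | [] => simp [pvLoopA, pvLoopB, ha, hs]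
          | b :: rest' =>
            by_cases hb : PySem.Chars.startswith b.toList ['-'] = true
            · have hrec := ih (b :: rest') hl
              have hirr := pvLoopB_expect_irrel h 1 0 (b :: rest')
                (Or.inr ⟨b, rest', rfl, hb⟩)
              simp [pvLoopA, pvLoopB, ha, hs, hb, hrec]
            · have hrec := ih rest' (by simp at hl; omega)
              simp [pvLoopA, pvLoopB, ha, hs, hb, hrec]
        · by_cases hm : a ∈ pvMultiFlags
          · -- multi-value flag: B enters state 2
            have hsplit := pvConsumeRun_split rest
            have hrun := pvConsumeRun_run rest
            have hrest := pvConsumeRun_rest rest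
            have hlen : (pvConsumeRun rest).2.length ≤ n :=
              le_trans (pvConsumeRun_len rest) hl
            have hrec := ih _ hlen
            have hirr := pvLoopB_expect_irrel h 2 0 _ hrest
            have h2 : pvLoopB h 2 rest =
                ((pvConsumeRun rest).1 ++ (pvLoopB h 2 (pvConsumeRun rest).2).1,
                 (pvLoopB h 2 (pvConsumeRun rest).2).2) := by
              conv_lhs => rw [← hsplit]
              exact pvLoopB_two_run h _ _ hrun
            rw [pvLoopA.eq_def]
            simp [pvLoopB, ha, hs, hm, h2, hirr, hrec]
          · -- flag taking no value: B stays in state 0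
            have hrec := ih rest hl
            rw [pvLoopA.eq_def]
            simp [pvLoopB, ha, hs, hm, hrec]
      · -- positional token in state 0
        have hrec := ih rest hl
        rw [pvLoopA.eq_def]
        simp [pvLoopB, ha, hrec]

-- ===== VERDICT (by name: the statement is the Claim_ definition above) =====
theorem preprocess_args_spec : Claim_equal_preprocess_args := by
  intro args _
  unfold Spec_preprocess_args preprocess_args preprocess_args_alt
  exact pvLoopA_eq_loopB _ args.length args (le_refl _)
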